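-- pv_equiv track=rewrite | github.com/christopher-inegbedion/Tic-Tac-Toe | main.py | is_group_a_winner
-- ===== SOURCE A (Python) =====
-- def is_group_a_winner(group):
--     """
--     Check if all the elements in the group are identical, return True if so, else False
--
--     :param group: A list with a group of X's and O's
--     :return: Return true if the group is a winner, False if not
--     """
--     start = ""
--     for i in range(len(group)):
--         if i == 0:
--             if group[i] == "-":
--                 return False
--             else:
--                 start = group[i]
--         else:
--             if group[i] == "-":
--                 return False
--             else:
--                 if group[i] != start:
--                     return False
--
--     return True
-- ===== SOURCE B (Python) =====
-- def is_group_a_winner(group):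
--     s = set(group)
--     return "-" not in s and len(s) <= 1
-- ===== Notes on version B (the rewrite author's own statement) =====
-- stated objective: idiomatic
-- what changed: Replaces the indexed early-return scan that compares each element to the stored first element with a deduplicate-then-test: build set(group) and return that it contains no dash and has at most one element.
import Mathlib
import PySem

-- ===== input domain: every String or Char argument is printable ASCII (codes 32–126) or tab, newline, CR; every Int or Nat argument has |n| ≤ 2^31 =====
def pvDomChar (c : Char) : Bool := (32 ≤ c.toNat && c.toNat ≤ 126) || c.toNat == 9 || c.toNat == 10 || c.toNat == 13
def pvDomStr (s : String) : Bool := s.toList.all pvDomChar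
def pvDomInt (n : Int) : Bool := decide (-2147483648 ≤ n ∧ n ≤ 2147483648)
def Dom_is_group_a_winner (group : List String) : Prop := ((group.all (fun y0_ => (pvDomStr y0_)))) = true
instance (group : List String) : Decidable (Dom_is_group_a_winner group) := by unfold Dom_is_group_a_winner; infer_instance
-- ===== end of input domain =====

-- B replaces A's indexed early-return scan with an idiomatic dedup-then-test: set(group) must
-- contain no "-" and at most one element. Equivalence of the return values is proved below.

-- ===== PORT A =====
-- the 'for i in range(len(group))' loop with its early returns, as index recursion
def is_group_a_winner_loop (group : List String) (start : String) (i : Nat) : Bool :=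
  if h : i < group.length then
    if i == 0 then
      if group[i] == "-" then false
      else is_group_a_winner_loop group (group[i]) (i + 1)
    else
      if group[i] == "-" then false
      else
        if group[i] != start then false
        else is_group_a_winner_loop group start (i + 1)
  else true
termination_by group.length - i

def is_group_a_winner (group : List String) : Bool :=
  is_group_a_winner_loop group "" 0

-- ===== PORT B =====
def is_group_a_winner_alt (group : List String) : Bool :=
  let s : PySem.Set String := PySem.Set.ofList group
  !(PySem.Set.contains s "-") && decide (PySem.Set.len s ≤ 1)

-- ===== PRECONDITION & SPEC =====
def Spec_is_group_a_winner (group : List String) (out : Bool) : Prop := out = is_group_a_winner_alt group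
instance (group : List String) (out : Bool) : Decidable (Spec_is_group_a_winner group out) := by unfold Spec_is_group_a_winner; infer_instance

-- ===== CLAIM (what is proved, stated in full; the proofs are below) =====
def Claim_equal_is_group_a_winner : Prop := ∀ (group : List String), Dom_is_group_a_winner group → Spec_is_group_a_winner group (is_group_a_winner group)

-- ===== LEMMAS AND PROOFS =====

-- the loop from index i ≥ 1 checks exactly the suffix drop i against start
theorem loop_suffix (group : List String) (start : String) (i : Nat) (hi : 1 ≤ i) :
    is_group_a_winner_loop group start i
      = (group.drop i).all (fun g => g != "-" && g == start) := by
  by_cases h : i < group.length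
  · rw [is_group_a_winner_loop]
    simp only [h, dif_pos]
    have hne : (i == 0) = false := by simp; omega
    rw [hne]
    simp only [Bool.false_eq_true, if_false]
    have hdrop : group.drop i = group[i] :: group.drop (i + 1) :=
      List.drop_eq_getElem_cons h
    rw [hdrop, List.all_cons]
    by_cases hd : group[i] = "-"
    · simp [hd]
    · have : (group[i] == "-") = false := by simp [hd]
      rw [this]
      simp only [Bool.false_eq_true, if_false]
      by_cases hs : group[i] = start
      · have h1 : (group[i] != start) = false := by simp [hs]
        rw [h1]
        simp only [Bool.false_eq_true, if_false]
        rw [loop_suffix group start (i + 1) (by omega)]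
        simp [hs]
        intro _
        rw [← hs]; exact hd
      · have h1 : (group[i] != start) = true := by simp [hs]
        rw [h1]
        simp [hd, hs]
  · rw [is_group_a_winner_loop]
    simp only [h, dif_neg, not_false_iff]
    rw [List.drop_eq_nil_of_le (by omega)]
    simp
termination_by group.length - i

theorem portA_cons (g0 : String) (rest : List String) :
    is_group_a_winner (g0 :: rest)
      = if g0 = "-" then false else rest.all (fun g => g != "-" && g == g0) := by
  unfold is_group_a_winner
  rw [is_group_a_winner_loop]
  have h : 0 < (g0 :: rest).length := by simp
  simp only [h, dif_pos, List.getElem_cons_zero, Nat.zero_add,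
    show ((0 : Nat) == 0) = true from rfl, if_true]
  by_cases hd : g0 = "-"
  · simp [hd]
  · have hb : (g0 == "-") = false := by simp [hd]
    rw [hb]
    simp only [Bool.false_eq_true, if_false, if_neg hd]
    rw [loop_suffix (g0 :: rest) g0 1 (le_refl 1)]
    simp

-- a list of length ≤ 1 cannot hold two distinct members
theorem mem_len_le_one {α : Type} (l : List α) (h : l.length ≤ 1) {a b : α}
    (ha : a ∈ l) (hb : b ∈ l) : a = b := by
  match l with
  | [] => cases ha
  | [c] => simp at ha hb; rw [ha, hb]
  | x :: y :: t => simp at h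

theorem ofList_len_le_one_iff (g0 : String) (rest : List String) :
    (PySem.Set.ofList (g0 :: rest)).length ≤ 1 ↔ ∀ x ∈ rest, x = g0 := by
  constructor
  · intro h x hx
    exact mem_len_le_one _ h ((PySem.Set.mem_ofList _ _).2 (by simp [hx]))
      ((PySem.Set.mem_ofList _ _).2 (by simp))
  · intro h
    have heq : PySem.Set.ofList (g0 :: rest) = [g0] := by
      have hall : g0 :: rest = List.replicate (rest.length + 1) g0 := by
        simp [List.eq_replicate_iff]
        intro x hx; exact h x hx
      rw [hall]
      induction rest.length with
      | zero => rfl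
      | succ n ih =>
        rw [List.replicate_succ', PySem.Set.ofList_eq_foldl, List.foldl_append,
          ← PySem.Set.ofList_eq_foldl, ih]
        simp [PySem.Set.add]
    rw [heq]; simp

-- B's result, read as a proposition
theorem altB_iff (group : List String) :
    is_group_a_winner_alt group = true
      ↔ ("-" ∉ group ∧ (PySem.Set.ofList group).length ≤ 1) := by
  simp [is_group_a_winner_alt, PySem.Set.mem_ofList, PySem.Set.len]

theorem is_group_a_winner_spec' (group : List String) :
    is_group_a_winner group = is_group_a_winner_alt group := by
  cases group with
  | nil =>
    rw [is_group_a_winner, is_group_a_winner_loop]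
    simp [is_group_a_winner_alt, PySem.Set.ofList, PySem.Set.len]
  | cons g0 rest =>
    rw [portA_cons, Bool.eq_iff_iff, altB_iff, ofList_len_le_one_iff]
    by_cases hd : g0 = "-"
    · simp [hd]
    · rw [if_neg hd]
      simp only [List.all_eq_true, List.mem_cons, not_or]
      constructor
      · intro hall
        refine ⟨⟨fun h => hd h.symm, fun hm => ?_⟩, fun x hx => ?_⟩
        · have := hall _ hm; simp at this
        · have := hall x hx; simp at this; exact this.2
      · rintro ⟨⟨_, hnd⟩, hall⟩ x hx
        have hx0 := hall x hx
        simp [hx0, hd]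

-- ===== VERDICT (by name: the statement is the Claim_ definition above) =====
theorem is_group_a_winner_spec : Claim_equal_is_group_a_winner := by
  intro group _
  exact is_group_a_winner_spec' group
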